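-- pv_equiv track=rewrite | github.com/flexgp/programsynthesishunting | src/PonyGE2/grammars/progsys_solutions.py | replace_space_with_newline
-- ===== SOURCE A (Python) =====
-- def replace_space_with_newline(string):
--     new_string = ""
--     count = 0
--     for char in string:
--         if char == " ":
--             new_string += "\n"
--         else:
--             new_string += char
--             count += 1
--     return new_string, count
-- ===== SOURCE B (Python) =====
-- def replace_space_with_newline(string):
--     parts = string.split(" ")
--     return "\n".join(parts), sum(len(p) for p in parts)
-- ===== Notes on version B (the rewrite author's own statement) =====
-- stated objective: faster
-- what changed: Replaces the char-by-char accumulating loop with a split on the space character into segments, a newline-join of the segments, and a count derived by summing segment lengths.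
import Mathlib
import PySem

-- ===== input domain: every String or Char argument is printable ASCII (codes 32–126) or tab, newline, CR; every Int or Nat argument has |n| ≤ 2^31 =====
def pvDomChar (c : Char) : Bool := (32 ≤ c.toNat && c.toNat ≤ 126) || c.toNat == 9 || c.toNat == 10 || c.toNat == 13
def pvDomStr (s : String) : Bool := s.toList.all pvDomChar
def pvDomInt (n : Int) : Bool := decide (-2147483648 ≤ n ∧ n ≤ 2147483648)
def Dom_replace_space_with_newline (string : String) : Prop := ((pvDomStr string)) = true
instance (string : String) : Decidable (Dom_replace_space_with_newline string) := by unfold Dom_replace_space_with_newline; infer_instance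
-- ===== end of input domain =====

-- B replaces A's char-by-char accumulating loop by split-on-space, "\n".join, and a sum of segment lengths (more idiomatic decomposition).


-- ===== PORT A =====
-- one pass over the characters, accumulating (new_string, count)
def replace_space_with_newline (string : String) : String × Int :=
  let r := string.toList.foldl
    (fun (st : List Char × Int) c =>
      if c = ' ' then (st.1 ++ ['\n'], st.2) else (st.1 ++ [c], st.2 + 1))
    ([], 0)
  (String.mk r.1, r.2)

-- ===== PORT B =====
-- parts = string.split(" "); return "\n".join(parts), sum(len(p) for p in parts)
def replace_space_with_newline_alt (string : String) : String × Int :=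
  let parts := PySem.Chars.splitOn string.toList [' ']
  (String.mk (PySem.Chars.join ['\n'] parts),
   (parts.map (fun p => (p.length : Int))).sum)

-- ===== PRECONDITION & SPEC =====
def Spec_replace_space_with_newline (string : String) (out : String × Int) : Prop := out = replace_space_with_newline_alt string
instance (string : String) (out : String × Int) : Decidable (Spec_replace_space_with_newline string out) := by unfold Spec_replace_space_with_newline; infer_instance

-- ===== CLAIM (what is proved, stated in full; the proofs are below) =====
def Claim_equal_replace_space_with_newline : Prop := ∀ (string : String), Dom_replace_space_with_newline string → Spec_replace_space_with_newline string (replace_space_with_newline string)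

-- ===== LEMMAS AND PROOFS =====

-- reference segmentation of a char list at spaces (split(" ") keeps empty fields)
def pvSegs : List Char → List (List Char)
  | [] => [[]]
  | c :: rest => if c = ' ' then [] :: pvSegs rest else (pvSegs rest).modifyHead (c :: ·)

theorem pvSegs_ne_nil (cs : List Char) : pvSegs cs ≠ [] := by
  induction cs with
  | nil => simp [pvSegs]
  | cons c rest ih =>
    simp only [pvSegs]
    split
    · simp
    · rcases h : pvSegs rest with _ | ⟨h0, t⟩
      · exact absurd h ih
      · simp

theorem pvSplitOn_go_eq (fuel : Nat) : ∀ (l cur : List Char) (accs : List (List Char)),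
    l.length < fuel →
    PySem.Chars.splitOn.go [' '] fuel l cur accs =
      accs.reverse ++ (pvSegs l).modifyHead (cur.reverse ++ ·) := by
  induction fuel with
  | zero => intro l cur accs h; omega
  | succ fuel ih =>
    intro l cur accs h
    cases l with
    | nil => simp [PySem.Chars.splitOn.go, pvSegs]
    | cons c rest =>
      by_cases hc : c = ' '
      · subst hc
        rw [PySem.Chars.splitOn.go]
        simp only [List.isPrefixOf, BEq.rfl, Bool.true_and, if_pos, List.length_cons,
          List.length_nil, List.drop_succ_cons, List.drop_zero]
        rw [ih rest [] (List.reverse cur :: accs) (by simpa using Nat.lt_of_succ_lt_succ h)]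
        rcases hs : pvSegs rest with _ | ⟨h0, t⟩
        · exact absurd hs (pvSegs_ne_nil rest)
        · simp [pvSegs, hs]
      · rw [PySem.Chars.splitOn.go]
        have hpre : List.isPrefixOf [' '] (c :: rest) = false := by
          simp [List.isPrefixOf]
          intro hcc; exact absurd hcc.symm hc
        rw [hpre]
        simp only [Bool.false_eq_true, if_false]
        rw [ih rest (c :: cur) accs (by simpa using Nat.lt_of_succ_lt_succ h)]
        rcases hs : pvSegs rest with _ | ⟨h0, t⟩
        · exact absurd hs (pvSegs_ne_nil rest)
        · simp [pvSegs, hs, hc]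

theorem pvSplitOn_eq (cs : List Char) :
    PySem.Chars.splitOn cs [' '] = pvSegs cs := by
  rw [PySem.Chars.splitOn, pvSplitOn_go_eq (cs.length + 1) cs [] [] (by omega)]
  rcases hs : pvSegs cs with _ | ⟨h0, t⟩
  · exact absurd hs (pvSegs_ne_nil cs)
  · simp

theorem pvJoin_segs (cs : List Char) :
    PySem.Chars.join ['\n'] (pvSegs cs) = cs.map (fun c => if c = ' ' then '\n' else c) := by
  induction cs with
  | nil => simp [pvSegs, PySem.Chars.join, List.intercalate]
  | cons c rest ih =>
    rcases hs : pvSegs rest with _ | ⟨h0, t⟩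
    · exact absurd hs (pvSegs_ne_nil rest)
    · by_cases hc : c = ' '
      · subst hc
        simp only [pvSegs, if_pos rfl, List.map_cons, ← ih, hs]
        simp [PySem.Chars.join, List.intercalate, List.intersperse]
      · simp only [pvSegs, if_neg hc, hs, List.modifyHead, List.map_cons, if_neg hc, ← ih]
        cases t <;> simp [PySem.Chars.join, List.intercalate, List.intersperse]

theorem pvSum_segs (cs : List Char) :
    ((pvSegs cs).map (fun p => (p.length : Int))).sum =
      (cs.countP (fun c => !(c == ' ')) : Int) := by
  induction cs with
  | nil => simp [pvSegs]
  | cons c rest ih =>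
    by_cases hc : c = ' '
    · subst hc
      simp only [pvSegs, if_pos rfl, List.map_cons, List.sum_cons, List.countP_cons]
      simp
      exact ih
    · rcases hs : pvSegs rest with _ | ⟨h0, t⟩
      · exact absurd hs (pvSegs_ne_nil rest)
      · rw [hs] at ih
        simp only [List.map_cons, List.sum_cons] at ih
        simp only [pvSegs, if_neg hc, hs, List.modifyHead, List.map_cons, List.sum_cons,
          List.countP_cons, List.length_cons]
        simp [hc]
        push_cast at ih ⊢
        omega

theorem pvFoldA (cs : List Char) : ∀ (s0 : List Char) (n0 : Int),
    cs.foldl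
      (fun (st : List Char × Int) c =>
        if c = ' ' then (st.1 ++ ['\n'], st.2) else (st.1 ++ [c], st.2 + 1))
      (s0, n0) =
      (s0 ++ cs.map (fun c => if c = ' ' then '\n' else c),
        n0 + (cs.countP (fun c => !(c == ' ')) : Int)) := by
  induction cs with
  | nil => intro s0 n0; simp
  | cons c rest ih =>
    intro s0 n0
    by_cases hc : c = ' '
    · subst hc
      simp [List.foldl_cons, ih]
    · simp [List.foldl_cons, ih, hc]
      omega

-- ===== VERDICT (by name: the statement is the Claim_ definition above) =====
theorem replace_space_with_newline_spec : Claim_equal_replace_space_with_newline := by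
  intro string _
  unfold Spec_replace_space_with_newline replace_space_with_newline replace_space_with_newline_alt
  simp only [pvSplitOn_eq, pvJoin_segs, pvSum_segs, pvFoldA]
  simp
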